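-- pv_equiv track=rewrite | github.com/Vinena/test | Hw5-2.py | DaYue
-- ===== SOURCE A (Python) =====
-- def DaYue (month_down,month_up):
--     sum=0
--     BigMonth=[1,3,5,7,8,10,12]
--     for nmonth in range (month_down,month_up):
--         if nmonth in BigMonth:
--             sum+=1
--         elif nmonth == 2:
--             sum-=2
--     return sum
-- ===== SOURCE B (Python) =====
-- def DaYue(month_down, month_up):
--     r = range(month_down, month_up)
--     big = sum(1 for m in (1, 3, 5, 7, 8, 10, 12) if m in r)
--     feb = 2 if 2 in r else 0
--     return big - feb
-- ===== Notes on version B (the rewrite author's own statement) =====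
-- stated objective: faster
-- what changed: Instead of scanning every integer in range(month_down, month_up), B iterates over the seven fixed big months testing membership in the range (plus a single February test), making the work constant regardless of the range size.
import Mathlib
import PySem

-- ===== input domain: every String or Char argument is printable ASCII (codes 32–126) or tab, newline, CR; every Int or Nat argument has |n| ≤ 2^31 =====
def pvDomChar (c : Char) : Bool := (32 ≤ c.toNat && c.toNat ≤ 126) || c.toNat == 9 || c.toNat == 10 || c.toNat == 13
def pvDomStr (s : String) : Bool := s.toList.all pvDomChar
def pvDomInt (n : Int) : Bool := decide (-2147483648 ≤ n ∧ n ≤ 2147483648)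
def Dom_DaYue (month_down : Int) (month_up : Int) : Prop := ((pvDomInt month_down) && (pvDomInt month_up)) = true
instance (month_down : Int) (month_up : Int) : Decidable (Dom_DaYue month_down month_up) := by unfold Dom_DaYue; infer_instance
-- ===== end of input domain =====

-- B replaces A's scan of every integer of the range by a constant-size pass
-- over the seven big months (membership-in-range tests), plus one February test.

-- ===== PORT A =====
def DaYue (month_down : Int) (month_up : Int) : Int :=
  (PySem.List.pyRange month_down month_up 1).foldl
    (fun s nmonth =>
      if nmonth ∈ ([1, 3, 5, 7, 8, 10, 12] : List Int) then s + 1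
      else if nmonth = 2 then s - 2
      else s) 0

-- ===== PORT B =====
def DaYue_alt (month_down : Int) (month_up : Int) : Int :=
  let big : Int :=
    (([1, 3, 5, 7, 8, 10, 12] : List Int).filter
      (fun m => decide (month_down ≤ m ∧ m < month_up))).length
  let feb : Int := if month_down ≤ 2 ∧ 2 < month_up then 2 else 0
  big - feb

-- ===== PRECONDITION & SPEC =====
def Spec_DaYue (month_down : Int) (month_up : Int) (out : Int) : Prop := out = DaYue_alt month_down month_up
instance (month_down : Int) (month_up : Int) (out : Int) : Decidable (Spec_DaYue month_down month_up out) := by unfold Spec_DaYue; infer_instance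

-- ===== CLAIM (what is proved, stated in full; the proofs are below) =====
def Claim_equal_DaYue : Prop := ∀ (month_down : Int) (month_up : Int), Dom_DaYue month_down month_up → Spec_DaYue month_down month_up (DaYue month_down month_up)

-- ===== LEMMAS AND PROOFS =====

/-- Per-element contribution of A's loop body. -/
def gDaYue (m : Int) : Int :=
  if m ∈ ([1, 3, 5, 7, 8, 10, 12] : List Int) then 1 else if m = 2 then -2 else 0

theorem DaYue_eq_sum (a b : Int) :
    DaYue a b = ((PySem.List.pyRange a b 1).map gDaYue).sum := by
  unfold DaYue
  rw [show (fun (s nmonth : Int) =>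
      if nmonth ∈ ([1, 3, 5, 7, 8, 10, 12] : List Int) then s + 1
      else if nmonth = 2 then s - 2
      else s) = (fun s m => s + gDaYue m) by
    funext s m; simp only [gDaYue]; split_ifs <;> ring]
  rw [PySem.List.foldl_add]
  ring

theorem sum_g_zero (a b : Int) (h : ∀ m : Int, a ≤ m → m < b → m ≤ 0 ∨ 13 ≤ m) :
    ((PySem.List.pyRange a b 1).map gDaYue).sum = 0 := by
  apply List.sum_eq_zero
  intro x hx
  obtain ⟨m, hm, rfl⟩ := List.mem_map.mp hx
  obtain ⟨h1, h2⟩ := PySem.List.mem_pyRange_one.mp hm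
  have := h m h1 h2
  have hnb : m ∉ ([1, 3, 5, 7, 8, 10, 12] : List Int) := by
    simp only [List.mem_cons, List.not_mem_nil, or_false]
    push Not
    omega
  have hn2 : m ≠ 2 := by omega
  simp [gDaYue, hnb, hn2]

theorem mid_eq (lo hi : Int) (_h1 : 1 ≤ lo) (h2 : lo ≤ 13) (h3 : 1 ≤ hi) (h4 : hi ≤ 13) :
    ((PySem.List.pyRange lo hi 1).map gDaYue).sum = DaYue_alt lo hi := by
  interval_cases lo <;> interval_cases hi <;> decide

theorem clamp_eq (md mu : Int) (_h1 : md < mu) (h2 : md < 13) (h3 : 1 < mu) :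
    DaYue_alt (max md 1) (min mu 13) = DaYue_alt md mu := by
  unfold DaYue_alt
  have hf : (([1, 3, 5, 7, 8, 10, 12] : List Int).filter
        (fun m => decide (max md 1 ≤ m ∧ m < min mu 13)))
      = (([1, 3, 5, 7, 8, 10, 12] : List Int).filter
        (fun m => decide (md ≤ m ∧ m < mu))) := by
    apply List.filter_congr
    intro m hm
    have hb : 1 ≤ m ∧ m ≤ 12 := by
      simp only [List.mem_cons, List.not_mem_nil, or_false] at hm; omega
    rw [decide_eq_decide]
    omega
  rw [hf]
  have hfe : (max md 1 ≤ 2 ∧ 2 < min mu 13) ↔ (md ≤ 2 ∧ 2 < mu) := by omega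
  rw [if_congr hfe rfl rfl]

theorem alt_trivial (md mu : Int) (h : ∀ m : Int, md ≤ m → m < mu → m ≤ 0 ∨ 13 ≤ m) :
    DaYue_alt md mu = 0 := by
  unfold DaYue_alt
  have hf : (([1, 3, 5, 7, 8, 10, 12] : List Int).filter
      (fun m => decide (md ≤ m ∧ m < mu))) = [] := by
    rw [List.filter_eq_nil_iff]
    intro m hm
    have hb : 1 ≤ m ∧ m ≤ 12 := by
      simp only [List.mem_cons, List.not_mem_nil, or_false] at hm; omega
    have := fun ha hb' => h m ha hb'
    simp only [decide_eq_true_eq]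
    by_contra hc
    rcases this hc.1 hc.2 with h' | h' <;> omega
  rw [hf]
  have hfe : ¬ (md ≤ 2 ∧ 2 < mu) := by
    by_contra hc
    rcases h 2 hc.1 hc.2 with h' | h' <;> omega
  simp [hfe]

-- ===== VERDICT (by name: the statement is the Claim_ definition above) =====
theorem DaYue_spec : Claim_equal_DaYue := by
  intro md mu _
  unfold Spec_DaYue
  rw [DaYue_eq_sum]
  by_cases hmain : md < mu ∧ md < 13 ∧ 1 < mu
  · obtain ⟨h1, h2, h3⟩ := hmain
    set lo := max md 1 with hlo
    set hi := min mu 13 with hhi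
    have hsplit1 : md ≤ lo := by omega
    have hsplit2 : lo ≤ hi := by omega
    have hsplit3 : hi ≤ mu := by omega
    rw [PySem.List.pyRange_one_append md lo mu hsplit1 (by omega),
        PySem.List.pyRange_one_append lo hi mu hsplit2 hsplit3,
        List.map_append, List.map_append, List.sum_append, List.sum_append]
    rw [sum_g_zero md lo (by omega), sum_g_zero hi mu (by omega)]
    rw [mid_eq lo hi (by omega) (by omega) (by omega) (by omega)]
    rw [clamp_eq md mu h1 h2 h3]
    ring
  · have hcond : ∀ m : Int, md ≤ m → m < mu → m ≤ 0 ∨ 13 ≤ m := by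
      intro m ha hb; omega
    rw [sum_g_zero md mu hcond, alt_trivial md mu hcond]
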